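-- pv_equiv track=rewrite | github.com/fdavies93/minibudget | minibudget.py | tokenise_line
-- ===== SOURCE A (Python) =====
-- def tokenise_line(line: str) -> list[str]:
--     delimiter = "\""
--     separator = " \n"
--     buffer = ""
--     fields = []
--     delimited = False
--     for char in line:
--         if char == delimiter:
--             delimited = not delimited
--         elif char in separator and not delimited and len(buffer) > 0:
--             fields.append(buffer)
--             buffer = ""
--         elif (char not in separator) or delimited:
--             buffer += char
--     return fields
-- ===== SOURCE B (Python) =====
-- def tokenise_line(line: str) -> list[str]:
--     fields = []
--     buffer = ""
--     for i, seg in enumerate(line.split('"')):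
--         if i % 2 == 1:
--             buffer += seg
--         else:
--             for char in seg:
--                 if char in " \n":
--                     if buffer:
--                         fields.append(buffer)
--                         buffer = ""
--                 else:
--                     buffer += char
--     # no final flush: the trailing token is dropped, as in the original
--     return fields
-- ===== Notes on version B (the rewrite author's own statement) =====
-- stated objective: alternative
-- what changed: B drops A's per-character quoting flag: it splits the line on the quote character once and uses segment-index parity as the quoting state, appending odd-index segments whole and scanning only even-index segments for separators.
import Mathlib
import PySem

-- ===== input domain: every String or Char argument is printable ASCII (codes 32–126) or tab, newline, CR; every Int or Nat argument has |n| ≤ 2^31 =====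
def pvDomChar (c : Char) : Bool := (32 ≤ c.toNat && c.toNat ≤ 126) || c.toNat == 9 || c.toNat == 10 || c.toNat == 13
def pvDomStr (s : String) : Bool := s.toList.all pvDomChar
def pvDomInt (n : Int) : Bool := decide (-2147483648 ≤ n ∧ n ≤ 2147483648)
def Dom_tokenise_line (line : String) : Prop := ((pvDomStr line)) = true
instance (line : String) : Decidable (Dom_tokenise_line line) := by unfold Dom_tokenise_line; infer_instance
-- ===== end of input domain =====

-- B replaces A's per-char state machine (a quoting flag toggled on each quote char) by
-- splitting the line on the quote char once and using segment-index parity as the quoting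
-- state (same cost, different decomposition); like A, B never flushes after the loop, so
-- the trailing token is dropped by both.

-- ===== PORT A =====
-- one step of A's for-loop; state = (buffer, fields, delimited)
def tlStepA (st : List Char × List String × Bool) (c : Char) : List Char × List String × Bool :=
  if c = '"' then (st.1, st.2.1, !st.2.2)
  else if (c = ' ' ∨ c = '\n') ∧ st.2.2 = false ∧ st.1 ≠ [] then ([], st.2.1 ++ [String.ofList st.1], st.2.2)
  else if (¬ (c = ' ' ∨ c = '\n')) ∨ st.2.2 = true then (st.1 ++ [c], st.2.1, st.2.2)
  else st

def tokenise_line (line : String) : List String :=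
  (line.toList.foldl tlStepA ([], [], false)).2.1

-- ===== PORT B =====
-- port of line.split('"') over the character list (keeps empty pieces, result never empty)
def tlSplitQuote : List Char → List (List Char)
  | [] => [[]]
  | c :: cs =>
    if c = '"' then [] :: tlSplitQuote cs
    else
      match tlSplitQuote cs with
      | [] => [[c]]   -- unreachable: tlSplitQuote never returns []
      | s :: ss => (c :: s) :: ss

-- one step of B's inner loop over an unquoted segment; state = (buffer, fields)
def tlStepB (st : List Char × List String) (c : Char) : List Char × List String :=
  if c = ' ' ∨ c = '\n' then
    if st.1 ≠ [] then ([], st.2 ++ [String.ofList st.1]) else st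
  else (st.1 ++ [c], st.2)

def tokenise_line_alt (line : String) : List String :=
  ((PySem.List.enumerate (tlSplitQuote line.toList)).foldl
    (fun (st : List Char × List String) (iseg : Int × List Char) =>
      if iseg.1 % 2 = 1 then (st.1 ++ iseg.2, st.2) else iseg.2.foldl tlStepB st) ([], [])).2

-- ===== PRECONDITION & SPEC =====
def Spec_tokenise_line (line : String) (out : List String) : Prop := out = tokenise_line_alt line
instance (line : String) (out : List String) : Decidable (Spec_tokenise_line line out) := by unfold Spec_tokenise_line; infer_instance

-- ===== CLAIM (what is proved, stated in full; the proofs are below) =====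
def Claim_equal_tokenise_line : Prop := ∀ (line : String), Dom_tokenise_line line → Spec_tokenise_line line (tokenise_line line)

-- ===== LEMMAS AND PROOFS =====

-- proof-side recursive form of B's enumerate-parity loop: `par` = "current segment is quoted"
def tlProcB (par : Bool) : List (List Char) → (List Char × List String) → List Char × List String
  | [], st => st
  | seg :: rest, st =>
    tlProcB (!par) rest (if par then (st.1 ++ seg, st.2) else seg.foldl tlStepB st)

theorem tlProcB_nil (par : Bool) (st : List Char × List String) : tlProcB par [] st = st := rfl

theorem tlProcB_cons (par : Bool) (seg : List Char) (rest : List (List Char))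
    (st : List Char × List String) :
    tlProcB par (seg :: rest) st
      = tlProcB (!par) rest (if par then (st.1 ++ seg, st.2) else seg.foldl tlStepB st) := rfl

theorem tlSplitQuote_ne_nil (cs : List Char) : tlSplitQuote cs ≠ [] := by
  cases cs with
  | nil => simp [tlSplitQuote]
  | cons c cs =>
    simp only [tlSplitQuote]
    split
    · simp
    · cases h : tlSplitQuote cs <;> simp

-- B's foldl over `enumerate` starting at n equals tlProcB with parity (n % 2 == 1)
theorem tlEnum_eq_procB (segs : List (List Char)) (n : Int) (st : List Char × List String) :
    ((PySem.List.enumerate segs n).foldl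
      (fun (st : List Char × List String) (iseg : Int × List Char) =>
        if iseg.1 % 2 = 1 then (st.1 ++ iseg.2, st.2) else iseg.2.foldl tlStepB st) st)
    = tlProcB (n % 2 == 1) segs st := by
  induction segs generalizing n st with
  | nil => simp [PySem.List.enumerate, tlProcB_nil]
  | cons seg rest ih =>
    rw [PySem.List.enumerate_cons]
    simp only [List.foldl_cons, tlProcB_cons]
    rw [ih]
    have hpar : ((n + 1) % 2 == 1) = !(n % 2 == 1) := by
      rcases Int.emod_two_eq n with h | h <;> simp [Int.add_emod, h]
    by_cases h : n % 2 = 1 <;> simp [h, hpar]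

-- the core correspondence: A's char fold = B's segment processing, for any start state
theorem tlMain (cs : List Char) (buf : List Char) (flds : List String) (d : Bool) :
    ∃ d', cs.foldl tlStepA (buf, flds, d)
      = ((tlProcB d (tlSplitQuote cs) (buf, flds)).1, (tlProcB d (tlSplitQuote cs) (buf, flds)).2, d') := by
  induction cs generalizing buf flds d with
  | nil => exact ⟨d, by simp [tlSplitQuote, tlProcB_cons, tlProcB_nil]⟩
  | cons c cs ih =>
    by_cases hq : c = '"'
    · subst hq
      simp only [List.foldl_cons, tlStepA, tlSplitQuote]
      rcases ih buf flds (!d) with ⟨d', hd'⟩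
      exact ⟨d', by cases d <;> simpa [tlProcB_cons, tlStepB] using hd'⟩
    · obtain ⟨s, ss, hsplit⟩ : ∃ s ss, tlSplitQuote cs = s :: ss := by
        cases h : tlSplitQuote cs with
        | nil => exact absurd h (tlSplitQuote_ne_nil cs)
        | cons s ss => exact ⟨s, ss, rfl⟩
      simp only [tlSplitQuote, if_neg hq, hsplit]
      cases d with
      | true =>
        have hstep : tlStepA (buf, flds, true) c = (buf ++ [c], flds, true) := by
          simp [tlStepA, hq]
        rcases ih (buf ++ [c]) flds true with ⟨d', hd'⟩
        refine ⟨d', ?_⟩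
        simp only [List.foldl_cons, hstep, hd', hsplit, tlProcB_cons]
        simp
      | false =>
        by_cases hsep : c = ' ' ∨ c = '\n'
        · by_cases hbuf : buf ≠ []
          · have hstep : tlStepA (buf, flds, false) c = ([], flds ++ [String.ofList buf], false) := by
              simp [tlStepA, hq, hsep, hbuf]
            rcases ih [] (flds ++ [String.ofList buf]) false with ⟨d', hd'⟩
            refine ⟨d', ?_⟩
            simp only [List.foldl_cons, hstep, hd', hsplit, tlProcB_cons, List.foldl_cons,
              tlStepB, if_pos hsep, if_pos hbuf]
            simp
          · simp only [ne_eq, not_not] at hbuf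
            have hstep : tlStepA (buf, flds, false) c = (buf, flds, false) := by
              simp [tlStepA, hq, hsep, hbuf]
            rcases ih buf flds false with ⟨d', hd'⟩
            refine ⟨d', ?_⟩
            simp only [List.foldl_cons, hstep, hd', hsplit, tlProcB_cons, List.foldl_cons,
              tlStepB, if_pos hsep]
            simp [hbuf]
        · have hstep : tlStepA (buf, flds, false) c = (buf ++ [c], flds, false) := by
            simp [tlStepA, hq, hsep]
          rcases ih (buf ++ [c]) flds false with ⟨d', hd'⟩
          refine ⟨d', ?_⟩
          simp only [List.foldl_cons, hstep, hd', hsplit, tlProcB_cons, List.foldl_cons,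
            tlStepB, if_neg hsep]
          simp

-- ===== VERDICT (by name: the statement is the Claim_ definition above) =====
theorem tokenise_line_spec : Claim_equal_tokenise_line := by
  intro line _
  unfold Spec_tokenise_line tokenise_line tokenise_line_alt
  rcases tlMain line.toList [] [] false with ⟨d', hd'⟩
  rw [hd']
  rw [tlEnum_eq_procB (tlSplitQuote line.toList) 0 ([], [])]
  norm_num
  rfl
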